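-- pv_equiv track=rewrite | github.com/whorishabhverma/python_basics | important_codes_only/practice_question_9.py | solve
-- ===== SOURCE A (Python) =====
-- def strictly_increasing(start, end, arr):
--     for i in range(start, end - 1):
--         if arr[i] >= arr[i + 1]:
--             return False
--     return True
--
-- def strictly_decreasing(start, end, arr):
--     for i in range(start, end - 1):
--         if arr[i] <= arr[i + 1]:
--             return False
--     return True
--
-- def solve(arr):
--     n = len(arr)
--     if n < 3:
--         return False  # Less than 3 elements cannot form the required pattern
--
--     # Check if the array is fully increasing or fully decreasing
--     if strictly_increasing(0, n, arr) or strictly_decreasing(0, n, arr):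
--         return False
--
--     for i in range(1, n):
--         if strictly_increasing(0, i, arr) and strictly_decreasing(i, n, arr):
--             return True
--         if strictly_decreasing(0, i, arr) and strictly_increasing(i, n, arr):
--             return True
--
--     return False
-- ===== SOURCE B (Python) =====
-- def _run(xs, decreasing=False):
--     # length of the longest strictly monotone prefix of xs
--     k = 1
--     for a, b in zip(xs, xs[1:]):
--         if (a > b) if decreasing else (a < b):
--             k += 1
--         else:
--             break
--     return k
--
-- def solve(arr):
--     n = len(arr)
--     if n < 3:
--         return False
--     p_inc = _run(arr)                 # longest strictly increasing prefix
--     p_dec = _run(arr, True)           # longest strictly decreasing prefix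
--     if p_inc == n or p_dec == n:
--         return False                  # fully monotone
--     r = arr[::-1]
--     s_dec = n - _run(r)               # arr[s_dec:] is the longest strictly decreasing suffix
--     s_inc = n - _run(r, True)         # arr[s_inc:] is the longest strictly increasing suffix
--     return s_dec <= p_inc or s_inc <= p_dec
-- ===== Notes on version B (the rewrite author's own statement) =====
-- stated objective: faster
-- what changed: A rescans the whole prefix/suffix for every split point (quadratic); B computes the four maximal strictly-monotone run lengths (increasing/decreasing prefix, via the reversed list the suffixes) in single passes and decides every split at once by comparing run lengths.
import Mathlib
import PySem

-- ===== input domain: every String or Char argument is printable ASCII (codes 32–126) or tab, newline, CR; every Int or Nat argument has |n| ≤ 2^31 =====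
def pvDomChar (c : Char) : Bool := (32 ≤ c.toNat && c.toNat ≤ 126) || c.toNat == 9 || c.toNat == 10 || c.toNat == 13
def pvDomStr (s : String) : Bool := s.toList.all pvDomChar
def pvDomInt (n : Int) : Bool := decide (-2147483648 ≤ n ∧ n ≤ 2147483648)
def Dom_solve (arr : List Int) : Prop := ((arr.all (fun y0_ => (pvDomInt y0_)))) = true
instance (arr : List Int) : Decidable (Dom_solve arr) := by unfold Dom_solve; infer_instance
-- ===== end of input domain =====

-- B replaces A's quadratic rescan of every split with four one-pass maximal-run lengths compared in O(1); equality of return values is proved below.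


-- ===== PORT A =====
def strictlyIncreasing (start e : Int) (arr : List Int) : Bool :=
  (PySem.List.pyRange start (e - 1) 1).all fun i =>
    !decide (PySem.List.pyGetD arr i 0 ≥ PySem.List.pyGetD arr (i + 1) 0)

def strictlyDecreasing (start e : Int) (arr : List Int) : Bool :=
  (PySem.List.pyRange start (e - 1) 1).all fun i =>
    !decide (PySem.List.pyGetD arr i 0 ≤ PySem.List.pyGetD arr (i + 1) 0)

def solve (arr : List Int) : Bool :=
  let n : Int := PySem.List.len arr
  if n < 3 then false
  else if strictlyIncreasing 0 n arr || strictlyDecreasing 0 n arr then false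
  else (PySem.List.pyRange 1 n 1).any fun i =>
    (strictlyIncreasing 0 i arr && strictlyDecreasing i n arr) ||
    (strictlyDecreasing 0 i arr && strictlyIncreasing i n arr)

-- ===== PORT B =====
-- _run walks the list of adjacent pairs (zip(xs, xs[1:])) and stops at the first non-monotone pair
def runPairs (dec : Bool) : List (Int × Int) → Int
  | [] => 0
  | (a, b) :: rest => if (if dec then a > b else a < b) then 1 + runPairs dec rest else 0

def runLen (xs : List Int) (dec : Bool) : Int := 1 + runPairs dec (xs.zip (xs.drop 1))

def solve_alt (arr : List Int) : Bool :=
  let n : Int := PySem.List.len arr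
  if n < 3 then false
  else
    let pInc := runLen arr false
    let pDec := runLen arr true
    if pInc == n || pDec == n then false
    else
      let r := arr.reverse        -- arr[::-1]
      let sDec := n - runLen r false
      let sInc := n - runLen r true
      decide (sDec ≤ pInc) || decide (sInc ≤ pDec)

-- ===== PRECONDITION & SPEC =====
def Spec_solve (arr : List Int) (out : Bool) : Prop := out = solve_alt arr
instance (arr : List Int) (out : Bool) : Decidable (Spec_solve arr out) := by unfold Spec_solve; infer_instance

-- ===== CLAIM (what is proved, stated in full; the proofs are below) =====
def Claim_equal_solve : Prop := ∀ (arr : List Int), Dom_solve arr → Spec_solve arr (solve arr)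

-- ===== LEMMAS AND PROOFS =====

/-- adjacency relation at index `i`: increasing (`dec = false`) or decreasing (`dec = true`). -/
def RelAt (arr : List Int) (dec : Bool) (i : Nat) : Prop :=
  if dec then arr.getD (i + 1) 0 < arr.getD i 0 else arr.getD i 0 < arr.getD (i + 1) 0

/-- Nat-valued mirror of `runLen`. -/
def runN (dec : Bool) : List Int → Nat
  | a :: b :: r => if (if dec then a > b else a < b) then runN dec (b :: r) + 1 else 1
  | _ => 1

lemma runLen_eq (xs : List Int) (dec : Bool) : runLen xs dec = (runN dec xs : Int) := by
  induction xs with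
  | nil => simp [runLen, runPairs, runN]
  | cons a t ih =>
    cases t with
    | nil => simp [runLen, runPairs, runN]
    | cons b r =>
      have ih' : runPairs dec ((b :: r).zip r) = (runN dec (b :: r) : Int) - 1 := by
        simp only [runLen, List.drop_succ_cons, List.drop_zero] at ih; omega
      simp only [runLen, List.drop_succ_cons, List.drop_zero, List.zip_cons_cons, runPairs, runN]
      split <;> split <;> push_cast <;> omega

lemma runN_pos (dec : Bool) (xs : List Int) : 1 ≤ runN dec xs := by
  cases xs with
  | nil => simp [runN]
  | cons a t =>
    cases t with
    | nil => simp [runN]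
    | cons b r =>
      simp only [runN]
      split <;> first | omega | (split <;> omega)

lemma runN_le_length (dec : Bool) (xs : List Int) (h : xs ≠ []) : runN dec xs ≤ xs.length := by
  induction xs with
  | nil => simp at h
  | cons a t ih =>
    cases t with
    | nil => simp [runN]
    | cons b r =>
      have := ih (by simp)
      simp only [List.length_cons] at this ⊢
      simp only [runN]
      split <;> first | omega | (split <;> omega)

lemma relAt_cons (a : Int) (xs : List Int) (dec : Bool) (i : Nat) :
    RelAt (a :: xs) dec (i + 1) ↔ RelAt xs dec i := by
  simp [RelAt]

lemma le_runN_iff (dec : Bool) (xs : List Int) (k : Nat) (h1 : 1 ≤ k) (h2 : k ≤ xs.length) :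
    k ≤ runN dec xs ↔ ∀ i : Nat, i + 1 < k → RelAt xs dec i := by
  induction xs generalizing k with
  | nil => simp at h2; omega
  | cons a t ih =>
    cases t with
    | nil =>
      simp at h2
      interval_cases k
      simp [runN]
    | cons b r =>
      rcases Nat.eq_or_lt_of_le h1 with h | h
      · subst h
        simp [runN_pos]
      · -- 2 ≤ k
        constructor
        · intro hle i hi
          simp only [runN] at hle
          by_cases hab : (if dec then a > b else a < b)
          · rw [if_pos hab] at hle
            cases i with
            | zero => simp [RelAt]; cases dec <;> simp_all
            | succ j =>
              rw [relAt_cons]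
              have := (ih (k - 1) (by omega) (by simp at h2 ⊢; omega)).mp (by omega)
              exact this j (by omega)
          · rw [if_neg hab] at hle; omega
        · intro hall
          have hab : (if dec then a > b else a < b) := by
            have := hall 0 (by omega)
            simp [RelAt] at this; cases dec <;> simp_all
          simp only [runN, if_pos hab]
          have : k - 1 ≤ runN dec (b :: r) := by
            rw [ih (k - 1) (by omega) (by simp at h2 ⊢; omega)]
            intro i hi
            rw [← relAt_cons a]
            exact hall (i + 1) (by omega)
          omega

lemma relAt_reverse (arr : List Int) (dec : Bool) (t : Nat) (h : t + 1 < arr.length) :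
    RelAt arr.reverse dec t ↔ RelAt arr (!dec) (arr.length - 2 - t) := by
  have h1 : t < arr.reverse.length := by simp; omega
  have h2 : t + 1 < arr.reverse.length := by simp; omega
  have hm : arr.length - 2 - t < arr.length := by omega
  have hm1 : arr.length - 2 - t + 1 < arr.length := by omega
  have e1 : arr.reverse.getD t 0 = arr.getD (arr.length - 2 - t + 1) 0 := by
    rw [List.getD_eq_getElem _ _ h1, List.getD_eq_getElem _ _ hm1, List.getElem_reverse]
    congr 1; omega
  have e2 : arr.reverse.getD (t + 1) 0 = arr.getD (arr.length - 2 - t) 0 := by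
    rw [List.getD_eq_getElem _ _ h2, List.getD_eq_getElem _ _ hm]
    rw [List.getElem_reverse]
    congr 1; omega
  unfold RelAt
  rw [e1, e2]
  cases dec <;> simp

/-- A's increasing test over Nat bounds, in ∀-form. -/
lemma SI_iff (arr : List Int) (s e : Nat) :
    strictlyIncreasing (s : Int) (e : Int) arr = true ↔
      ∀ i : Nat, s ≤ i → i + 1 < e → RelAt arr false i := by
  unfold strictlyIncreasing
  rw [List.all_eq_true]
  constructor
  · intro hall i hsi hie
    have hm : (i : Int) ∈ PySem.List.pyRange (s : Int) ((e : Int) - 1) 1 := by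
      rw [PySem.List.mem_pyRange_one]; constructor <;> [exact_mod_cast hsi; omega]
    have := hall _ hm
    simp only [PySem.List.pyGetD_natCast] at this
    simp at this
    have : arr.getD i 0 < arr.getD (i + 1) 0 := by
      have h2 : ((i : Int) + 1) = ((i + 1 : Nat) : Int) := by push_cast; ring
      rw [h2, PySem.List.pyGetD_natCast] at this
      exact this
    simpa [RelAt] using this
  · intro hall x hx
    rw [PySem.List.mem_pyRange_one] at hx
    obtain ⟨hx1, hx2⟩ := hx
    have hx0 : 0 ≤ x := le_trans (by positivity) hx1
    obtain ⟨i, rfl⟩ : ∃ i : Nat, x = (i : Int) := ⟨x.toNat, (Int.toNat_of_nonneg hx0).symm⟩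
    have h2 : ((i : Int) + 1) = ((i + 1 : Nat) : Int) := by push_cast; ring
    simp only [PySem.List.pyGetD_natCast, h2]
    have := hall i (by exact_mod_cast hx1) (by omega)
    simp [RelAt] at this
    simp [this]

/-- A's decreasing test over Nat bounds, in ∀-form. -/
lemma SD_iff (arr : List Int) (s e : Nat) :
    strictlyDecreasing (s : Int) (e : Int) arr = true ↔
      ∀ i : Nat, s ≤ i → i + 1 < e → RelAt arr true i := by
  unfold strictlyDecreasing
  rw [List.all_eq_true]
  constructor
  · intro hall i hsi hie
    have hm : (i : Int) ∈ PySem.List.pyRange (s : Int) ((e : Int) - 1) 1 := by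
      rw [PySem.List.mem_pyRange_one]; constructor <;> [exact_mod_cast hsi; omega]
    have := hall _ hm
    simp only [PySem.List.pyGetD_natCast] at this
    simp at this
    have : arr.getD (i + 1) 0 < arr.getD i 0 := by
      have h2 : ((i : Int) + 1) = ((i + 1 : Nat) : Int) := by push_cast; ring
      rw [h2, PySem.List.pyGetD_natCast] at this
      exact this
    simpa [RelAt] using this
  · intro hall x hx
    rw [PySem.List.mem_pyRange_one] at hx
    obtain ⟨hx1, hx2⟩ := hx
    have hx0 : 0 ≤ x := le_trans (by positivity) hx1
    obtain ⟨i, rfl⟩ : ∃ i : Nat, x = (i : Int) := ⟨x.toNat, (Int.toNat_of_nonneg hx0).symm⟩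
    have h2 : ((i : Int) + 1) = ((i + 1 : Nat) : Int) := by push_cast; ring
    simp only [PySem.List.pyGetD_natCast, h2]
    have := hall i (by exact_mod_cast hx1) (by omega)
    simp [RelAt] at this
    simp [this]

/-- the suffix tests of A, via runs of the reversed list. -/
lemma suffix_iff (arr : List Int) (d : Bool) (j : Nat) (h3 : 3 ≤ arr.length) (hj : j ≤ arr.length) :
    (∀ i : Nat, j ≤ i → i + 1 < arr.length → RelAt arr (!d) i) ↔
      arr.length - runN d arr.reverse ≤ j := by
  have hrevlen : arr.reverse.length = arr.length := by simp
  constructor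
  · intro h
    rcases Nat.lt_or_ge j arr.length with hjN | hjN
    · have : arr.length - j ≤ runN d arr.reverse := by
        rw [le_runN_iff d arr.reverse (arr.length - j) (by omega) (by omega)]
        intro t ht
        rw [relAt_reverse arr d t (by omega)]
        exact h (arr.length - 2 - t) (by omega) (by omega)
      omega
    · have := runN_pos d arr.reverse
      omega
  · intro h i hji hiN
    have hNj : arr.length - j ≤ runN d arr.reverse := by omega
    have ht : (arr.length - 2 - i) + 1 < arr.length - j := by omega
    have := (le_runN_iff d arr.reverse (arr.length - j) (by omega) (by omega)).mp hNj
      (arr.length - 2 - i) ht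
    rw [relAt_reverse arr d (arr.length - 2 - i) (by omega)] at this
    have he : arr.length - 2 - (arr.length - 2 - i) = i := by omega
    rwa [he] at this

-- ===== VERDICT (by name: the statement is the Claim_ definition above) =====
theorem solve_spec : Claim_equal_solve := by
  intro arr _
  unfold Spec_solve
  show solve arr = solve_alt arr
  by_cases hsmall : (PySem.List.len arr) < 3
  · have hs : ((arr.length : Int) < 3) := by simpa [PySem.List.len] using hsmall
    simp only [solve, solve_alt, PySem.List.len_eq]
    rw [if_pos hs, if_pos hs]
  · have h3 : 3 ≤ arr.length := by simp [PySem.List.len] at hsmall; omega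
    have hne : arr ≠ [] := by intro h; subst h; simp at h3
    have hrne : arr.reverse ≠ [] := by simpa using hne
    have hpI := runN_le_length false arr hne
    have hpD := runN_le_length true arr hne
    have hsDle : runN false arr.reverse ≤ arr.length := by simpa using runN_le_length false arr.reverse hrne
    have hsIle : runN true arr.reverse ≤ arr.length := by simpa using runN_le_length true arr.reverse hrne
    have hsDpos := runN_pos false arr.reverse
    have hsIpos := runN_pos true arr.reverse
    -- prefix equivalences
    have EI : ∀ j : Nat, 1 ≤ j → j ≤ arr.length → (strictlyIncreasing 0 (j : Int) arr = true ↔ j ≤ runN false arr) := by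
      intro j h1 h2
      have h0 : ((0 : Nat) : Int) = (0 : Int) := by norm_num
      rw [← h0, SI_iff, le_runN_iff false arr j h1 h2]
      exact ⟨fun h i hi => h i (Nat.zero_le i) hi, fun h i _ hi => h i hi⟩
    have ED : ∀ j : Nat, 1 ≤ j → j ≤ arr.length → (strictlyDecreasing 0 (j : Int) arr = true ↔ j ≤ runN true arr) := by
      intro j h1 h2
      have h0 : ((0 : Nat) : Int) = (0 : Int) := by norm_num
      rw [← h0, SD_iff, le_runN_iff true arr j h1 h2]
      exact ⟨fun h i hi => h i (Nat.zero_le i) hi, fun h i _ hi => h i hi⟩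
    -- suffix equivalences
    have FD : ∀ j : Nat, j ≤ arr.length → (strictlyDecreasing (j : Int) (arr.length : Int) arr = true ↔ arr.length - runN false arr.reverse ≤ j) := by
      intro j hj
      rw [SD_iff]
      have := suffix_iff arr false j h3 hj
      simpa using this
    have FI : ∀ j : Nat, j ≤ arr.length → (strictlyIncreasing (j : Int) (arr.length : Int) arr = true ↔ arr.length - runN true arr.reverse ≤ j) := by
      intro j hj
      rw [SI_iff]
      have := suffix_iff arr true j h3 hj
      simpa using this
    -- full-array checks of A and B coincide
    have fullI : strictlyIncreasing 0 (arr.length : Int) arr = true ↔ runN false arr = arr.length := by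
      rw [EI arr.length (by omega) (le_refl arr.length)]; omega
    have fullD : strictlyDecreasing 0 (arr.length : Int) arr = true ↔ runN true arr = arr.length := by
      rw [ED arr.length (by omega) (le_refl arr.length)]; omega
    -- the two full-monotone correspondences (via j = 0 suffix tests = j = arr.length prefix tests)
    have corrD : runN false arr.reverse = arr.length ↔ runN true arr = arr.length := by
      have h1 := FD 0 (by omega)
      have h2 := ED arr.length (by omega) (le_refl arr.length)
      have e : ((0 : Nat) : Int) = (0 : Int) := by norm_num
      rw [e] at h1
      constructor
      · intro h; have := h2.mp (h1.mpr (by omega)); omega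
      · intro h; have := h1.mp (h2.mpr (by omega)); omega
    have corrI : runN true arr.reverse = arr.length ↔ runN false arr = arr.length := by
      have h1 := FI 0 (by omega)
      have h2 := EI arr.length (by omega) (le_refl arr.length)
      have e : ((0 : Nat) : Int) = (0 : Int) := by norm_num
      rw [e] at h1
      constructor
      · intro h; have := h2.mp (h1.mpr (by omega)); omega
      · intro h; have := h1.mp (h2.mpr (by omega)); omega
    -- now compare the two programs
    have hns : ¬ ((arr.length : Int) < 3) := by omega
    have hguardA : (strictlyIncreasing 0 (arr.length : Int) arr || strictlyDecreasing 0 (arr.length : Int) arr) = true ↔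
        (runN false arr = arr.length ∨ runN true arr = arr.length) := by
      rw [Bool.or_eq_true, fullI, fullD]
    have hguardB : ((runLen arr false == (arr.length : Int)) || (runLen arr true == (arr.length : Int))) = true ↔
        (runN false arr = arr.length ∨ runN true arr = arr.length) := by
      simp [runLen_eq, beq_iff_eq]
    simp only [solve, solve_alt, PySem.List.len_eq]
    rw [if_neg hns, if_neg hns]
    by_cases hfull : runN false arr = arr.length ∨ runN true arr = arr.length
    · rw [if_pos (hguardA.mpr hfull), if_pos (hguardB.mpr hfull)]
    · rw [if_neg (fun h => hfull (hguardA.mp h)), if_neg (fun h => hfull (hguardB.mp h))]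
      -- main case: the split search equals the run-length comparison
      rw [Bool.eq_iff_iff, List.any_eq_true]
      simp only [runLen_eq, Bool.or_eq_true, Bool.and_eq_true, decide_eq_true_eq]
      rw [not_or] at hfull
      constructor
      · rintro ⟨x, hx, hfx⟩
        rw [PySem.List.mem_pyRange_one] at hx
        obtain ⟨j, rfl⟩ : ∃ j : Nat, x = (j : Int) :=
          ⟨x.toNat, (Int.toNat_of_nonneg (by omega)).symm⟩
        have hj1 : 1 ≤ j := by exact_mod_cast hx.1
        have hjN : j < arr.length := by exact_mod_cast hx.2
        rw [EI j hj1 (by omega), ED j hj1 (by omega), FD j (by omega), FI j (by omega)] at hfx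
        rcases hfx with ⟨h1, h2⟩ | ⟨h1, h2⟩
        · left; omega
        · right; omega
      · intro h
        have hD : 1 ≤ arr.length - runN false arr.reverse := by
          rcases Nat.lt_or_ge (runN false arr.reverse) arr.length with h' | h'
          · omega
          · exact absurd (corrD.mp (by omega)) hfull.2
        have hI : 1 ≤ arr.length - runN true arr.reverse := by
          rcases Nat.lt_or_ge (runN true arr.reverse) arr.length with h' | h'
          · omega
          · exact absurd (corrI.mp (by omega)) hfull.1
        rcases h with h | h
        · have hsdpi : arr.length - runN false arr.reverse ≤ runN false arr := by omega
          refine ⟨((arr.length - runN false arr.reverse : Nat) : Int), ?_, ?_⟩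
          · rw [PySem.List.mem_pyRange_one]
            refine ⟨by exact_mod_cast hD, ?_⟩
            have hlt : arr.length - runN false arr.reverse < arr.length := by
              have : runN false arr ≠ arr.length := hfull.1
              omega
            exact_mod_cast hlt
          · left
            rw [EI _ (by omega) (by omega), FD _ (by omega)]
            exact ⟨hsdpi, le_refl _⟩
        · have hsipd : arr.length - runN true arr.reverse ≤ runN true arr := by omega
          refine ⟨((arr.length - runN true arr.reverse : Nat) : Int), ?_, ?_⟩
          · rw [PySem.List.mem_pyRange_one]
            refine ⟨by exact_mod_cast hI, ?_⟩
            have hlt : arr.length - runN true arr.reverse < arr.length := by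
              have : runN true arr ≠ arr.length := hfull.2
              omega
            exact_mod_cast hlt
          · right
            rw [ED _ (by omega) (by omega), FI _ (by omega)]
            exact ⟨hsipd, le_refl _⟩
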